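-- pv_equiv track=rewrite | github.com/Dae-yangKim/BOJ | 24/18187.py | solution
-- ===== SOURCE A (Python) =====
-- def solution(N : int) -> int:
--     line : int = N + 1
--     point : int = 0
--     plus : int = 0
--
--     for i in range(1 , N + 1):
--         point += plus
--
--         if i % 3 == 0:
--             continue
--         else:
--             plus += 1
--
--     return line + point
-- ===== SOURCE B (Python) =====
-- def solution(N: int) -> int:
--     # Closed form: answer = N+1 + sum_{k=0}^{N-1} (k - k//3).
--     if N <= 0:
--         return N + 1
--     q, r = divmod(N, 3)
--     return N + 1 + N * (N - 1) // 2 - (3 * q * (q - 1) // 2 + r * q)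
-- ===== Notes on version B (the rewrite author's own statement) =====
-- stated objective: faster
-- what changed: Replaced A's O(N) loop accumulating the running count of non-multiples of 3 by a closed-form arithmetic formula (N = 3q + r decomposition with triangular-number sums) evaluated in O(1).
import Mathlib
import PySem

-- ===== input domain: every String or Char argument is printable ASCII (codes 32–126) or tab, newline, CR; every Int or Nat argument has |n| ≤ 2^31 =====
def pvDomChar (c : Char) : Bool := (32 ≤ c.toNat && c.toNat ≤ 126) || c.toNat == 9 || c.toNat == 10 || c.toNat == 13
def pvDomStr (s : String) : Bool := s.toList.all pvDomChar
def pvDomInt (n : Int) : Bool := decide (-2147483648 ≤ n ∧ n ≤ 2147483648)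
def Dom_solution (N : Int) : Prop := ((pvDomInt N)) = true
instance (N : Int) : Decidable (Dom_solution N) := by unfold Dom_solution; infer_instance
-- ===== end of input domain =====

-- B replaces A's O(N) accumulation loop by a closed-form O(1) arithmetic formula (objective: faster).

-- ===== PORT A =====
-- literal transliteration of A's loop: state (point, plus), i runs over range(1, N+1)
def solution (N : Int) : Int :=
  let line : Int := N + 1
  let st :=
    (PySem.List.pyRange 1 (N + 1) 1).foldl
      (fun (s : Int × Int) (i : Int) =>
        let point := s.1 + s.2
        if PySem.Int.mod i 3 == 0 then (point, s.2) else (point, s.2 + 1))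
      (0, 0)
  line + st.1

-- ===== PORT B =====
-- literal transliteration of Source B's closed form
def solution_alt (N : Int) : Int :=
  if N ≤ 0 then N + 1
  else
    let q := PySem.Int.floordiv N 3
    let r := PySem.Int.mod N 3
    N + 1 + PySem.Int.floordiv (N * (N - 1)) 2
      - (PySem.Int.floordiv (3 * q * (q - 1)) 2 + r * q)

-- ===== PRECONDITION & SPEC =====
def Spec_solution (N : Int) (out : Int) : Prop := out = solution_alt N
instance (N : Int) (out : Int) : Decidable (Spec_solution N out) := by unfold Spec_solution; infer_instance

-- ===== CLAIM (what is proved, stated in full; the proofs are below) =====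
def Claim_equal_solution : Prop := ∀ (N : Int), Dom_solution N → Spec_solution N (solution N)

-- ===== LEMMAS AND PROOFS =====

-- the loop's `plus` after processing i = 1..n
def pvC : Nat → Int
  | 0 => 0
  | n + 1 => if (n + 1) % 3 == 0 then pvC n else pvC n + 1

-- the loop's `point` after processing i = 1..n
def pvP : Nat → Int
  | 0 => 0
  | n + 1 => pvP n + pvC n

lemma pvC_closed (n : Nat) : pvC n = (n : Int) - ((n / 3 : Nat) : Int) := by
  induction n with
  | zero => simp [pvC]
  | succ n ih =>
    simp only [pvC, beq_iff_eq]
    split_ifs with h <;> (rw [ih]; push_cast; omega)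

lemma pv_loop_eq (n : Nat) :
    (PySem.List.pyRange 1 ((n : Int) + 1) 1).foldl
      (fun (s : Int × Int) (i : Int) =>
        let point := s.1 + s.2
        if PySem.Int.mod i 3 == 0 then (point, s.2) else (point, s.2 + 1))
      (0, 0) = (pvP n, pvC n) := by
  induction n with
  | zero => simp [pvP, pvC, PySem.List.pyRange]
  | succ n ih =>
    have hstep : PySem.List.pyRange 1 ((n : Int) + 1 + 1) 1
        = PySem.List.pyRange 1 ((n : Int) + 1) 1 ++ [(n : Int) + 1] := by
      exact_mod_cast PySem.List.pyRange_one_succ_right (a := 1) (b := (n : Int) + 1) (by omega)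
    push_cast
    rw [hstep, List.foldl_append, ih]
    by_cases h : (n + 1) % 3 = 0
    · simp [pvP, pvC, h]
      omega
    · simp [pvP, pvC, h]
      omega

-- half of m*(m-1) is exact (consecutive integers)
lemma pv_half (m : Int) : 2 * (m * (m - 1) / 2) = m * (m - 1) := by
  rcases Int.even_or_odd m with ⟨k, hk⟩ | ⟨k, hk⟩ <;> subst hk
  · rw [show (k + k) * (k + k - 1) = 2 * (k * (k + k - 1)) by ring,
      Int.mul_ediv_cancel_left _ (by norm_num)]
  · rw [show (2 * k + 1) * (2 * k + 1 - 1) = 2 * ((2 * k + 1) * k) by ring,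
      Int.mul_ediv_cancel_left _ (by norm_num)]

-- half of 3*m*(m-1) is exact
lemma pv_half3 (m : Int) : 2 * (3 * m * (m - 1) / 2) = 3 * m * (m - 1) := by
  rcases Int.even_or_odd m with ⟨k, hk⟩ | ⟨k, hk⟩ <;> subst hk
  · rw [show 3 * (k + k) * (k + k - 1) = 2 * (3 * k * (k + k - 1)) by ring,
      Int.mul_ediv_cancel_left _ (by norm_num)]
  · rw [show 3 * (2 * k + 1) * (2 * k + 1 - 1) = 2 * (3 * (2 * k + 1) * k) by ring,
      Int.mul_ediv_cancel_left _ (by norm_num)]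

-- the closed form for `point`: n = 3q + r, r < 3
lemma pvP_closed (q r : Nat) (hr : r < 3) :
    pvP (3 * q + r) = 3 * (q : Int) ^ 2 + 2 * q * r + (if r = 2 then 1 else 0) := by
  induction q with
  | zero => interval_cases r <;> decide
  | succ q ih =>
    have hidx : 3 * (q + 1) + r = (3 * q + r) + 1 + 1 + 1 := by omega
    rw [hidx]
    simp only [pvP]
    rw [pvC_closed, pvC_closed, pvC_closed, ih]
    have h1 : (3 * q + r) / 3 = q := by omega
    have h2 : (3 * q + r + 1) / 3 = if r = 2 then q + 1 else q := by
      split_ifs with h <;> omega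
    have h3 : (3 * q + r + 1 + 1) / 3 = if r = 0 then q else q + 1 := by
      split_ifs with h <;> omega
    rw [h1, h2, h3]
    interval_cases r <;> (norm_num; ring)

lemma pv_main (n : Nat) (hn : 1 ≤ n) : solution (n : Int) = solution_alt (n : Int) := by
  have hNpos : ¬ ((n : Int) ≤ 0) := by omega
  have hP : pvP n = 3 * ((n / 3 : Nat) : Int) ^ 2 + 2 * ((n / 3 : Nat) : Int) * ((n % 3 : Nat) : Int)
      + (if n % 3 = 2 then 1 else 0) := by
    have h := pvP_closed (n / 3) (n % 3) (Nat.mod_lt _ (by norm_num))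
    rwa [Nat.div_add_mod] at h
  unfold solution solution_alt
  rw [pv_loop_eq n]
  simp only [if_neg hNpos,
    PySem.Int.floordiv_eq_ediv_of_pos (show (0:Int) < 2 by norm_num),
    PySem.Int.floordiv_eq_ediv_of_pos (show (0:Int) < 3 by norm_num),
    PySem.Int.mod_eq_emod_of_pos (show (0:Int) < 3 by norm_num)]
  rw [hP]
  have hq : ((n / 3 : Nat) : Int) = (n : Int) / 3 := by omega
  have hrq : ((n % 3 : Nat) : Int) = (n : Int) % 3 := by omega
  rw [hq, hrq]
  have hx2 := pv_half ((n : Int))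
  have hy2 := pv_half3 ((n : Int) / 3)
  have hsplit : (n : Int) = 3 * ((n : Int) / 3) + (n : Int) % 3 := by omega
  have hn2 : (n : Int) * ((n : Int) - 1)
      = (3 * ((n : Int) / 3) + (n : Int) % 3) * (3 * ((n : Int) / 3) + (n : Int) % 3 - 1) := by
    conv_lhs => rw [hsplit]
  have h3 : (n : Int) % 3 = 0 ∨ (n : Int) % 3 = 1 ∨ (n : Int) % 3 = 2 := by omega
  rcases h3 with h | h | h
  · have hN : n % 3 = 0 := by omega
    rw [h] at hn2
    rw [hN, h, if_neg (by decide : ¬ (0 : Nat) = 2)]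
    refine mul_left_cancel₀ (two_ne_zero) ?_
    linear_combination -hx2 + hy2 - hn2
  · have hN : n % 3 = 1 := by omega
    rw [h] at hn2
    rw [hN, h, if_neg (by decide : ¬ (1 : Nat) = 2)]
    refine mul_left_cancel₀ (two_ne_zero) ?_
    linear_combination -hx2 + hy2 - hn2
  · have hN : n % 3 = 2 := by omega
    rw [h] at hn2
    rw [hN, h, if_pos (rfl : (2 : Nat) = 2)]
    refine mul_left_cancel₀ (two_ne_zero) ?_
    linear_combination -hx2 + hy2 - hn2

lemma pv_nonpos (N : Int) (h : N ≤ 0) : solution N = solution_alt N := by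
  have hempty : PySem.List.pyRange 1 (N + 1) 1 = [] := by
    simp [PySem.List.pyRange]; omega
  unfold solution solution_alt
  rw [hempty]
  simp [h]

-- ===== VERDICT (by name: the statement is the Claim_ definition above) =====
theorem solution_spec : Claim_equal_solution := by
  intro N _
  unfold Spec_solution
  rcases le_or_gt N 0 with h | h
  · exact pv_nonpos N h
  · have hn : N = ((N.toNat : Nat) : Int) := by omega
    rw [hn]
    exact pv_main N.toNat (by omega)
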